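-- pv_equiv track=rewrite | github.com/hnzhang/python | RecoverIPv4Address.py | generate_ip_address_v2
-- ===== SOURCE A (Python) =====
-- def is_valid_ipv4_section(input):
--     '''
--     features of a section as ipv4
--     1. numbers in range of [0..255]
--     the following format is acceptable,
--         1,
--         255
--         03
--         030
--     '''
--     #if more than one digit, the first digit cannot be zero
--     #if len(input) > 1 and input[0] == '0':
--     #    return False
--     #every digit must be in [0..9]
--     num_0 = ord('0')
--     num_9 = ord('9')
--     for ch in input:
--         num = ord(ch)
--         if num < num_0 or num > num_9:
--             return False
--     try:
--         num = int(input)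
--         return num >= 0 and num <= 255
--     except:
--         return False
--
-- def generate_ip_address_v2(input):
--     '''
--     do it iteratively in stead of recursively
--     '''
--     import collections
--     class IPV4AddressParser:
--         def __init__(self, level, input_str, prefix):
--             self.level = level
--             self.input = input_str
--             self.prefix = prefix
--
--     if input is None:
--         return []
--     length = len(input)
--     if length < 4 or length > 12:
--         return []
--     generated = []
--     que = collections.deque()
--     que.append(IPV4AddressParser(1, input, ""))
--     while que:
--         item = que.popleft()
--         if item.level == 4 and is_valid_ipv4_section(item.input):
--             generated.append(item.prefix + "." + item.input)
--         else:
--             sub_length = len(item.input)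
--             for i in range(1, 4):
--                 if i < sub_length:
--                     part = item.input[0:i]
--                     if is_valid_ipv4_section(part):
--                         new_prefix = item.prefix + "." + part if item.prefix else part
--                         que.append(IPV4AddressParser(item.level+1, item.input[i:], new_prefix))
--     return generated
-- ===== SOURCE B (Python) =====
-- def generate_ip_address_v2(input):
--     '''
--     recursive backtracking (DFS) instead of A's explicit BFS queue
--     '''
--     if input is None:
--         return []
--     n = len(input)
--     if n < 4 or n > 12:
--         return []
--
--     def ok(seg):
--         return seg.isdigit() and 0 <= int(seg) <= 255
--
--     def walk(rest, prefix, depth):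
--         if depth == 3:
--             return [prefix + "." + rest] if ok(rest) else []
--         out = []
--         for i in (1, 2, 3):
--             if i < len(rest) and ok(rest[:i]):
--                 head = rest[:i]
--                 out += walk(rest[i:], prefix + "." + head if prefix else head, depth + 1)
--         return out
--
--     return walk(input, "", 0)
-- ===== Notes on version B (the rewrite author's own statement) =====
-- stated objective: alternative
-- what changed: Replaced A's explicit BFS over a deque of parser-state objects with a depth-indexed recursive backtracking (DFS) helper; the validity test becomes seg.isdigit() and 0 <= int(seg) <= 255 instead of a manual ord()-range scan with try/except.
import Mathlib
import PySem

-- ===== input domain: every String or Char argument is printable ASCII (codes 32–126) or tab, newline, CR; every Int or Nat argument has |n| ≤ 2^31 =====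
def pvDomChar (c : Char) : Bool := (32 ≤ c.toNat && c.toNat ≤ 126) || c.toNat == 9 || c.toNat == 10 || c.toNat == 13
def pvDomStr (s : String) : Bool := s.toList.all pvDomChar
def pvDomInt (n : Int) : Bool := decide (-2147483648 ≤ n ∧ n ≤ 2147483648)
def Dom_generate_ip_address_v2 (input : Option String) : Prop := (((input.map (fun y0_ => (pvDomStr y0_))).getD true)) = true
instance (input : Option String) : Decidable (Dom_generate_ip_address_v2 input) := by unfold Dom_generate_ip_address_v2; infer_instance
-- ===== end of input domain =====

-- B replaces A's explicit BFS queue by depth-indexed recursive backtracking (DFS), same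
-- return value (all valid dotted splits, in the same order): an alternative decomposition.

-- ===== PORT A =====

-- is_valid_ipv4_section: digit-scan loop, then num = int(input) (ValueError caught → False)
def is_valid_ipv4_section (cs : List Char) : Bool :=
  if cs.all (fun ch => 48 ≤ ch.toNat && ch.toNat ≤ 57) then  -- ord('0') ≤ ord(ch) ≤ ord('9')
    match PySem.Int.ofChars? cs with                          -- int(input); none = ValueError → except → False
    | some num => decide (0 ≤ num ∧ num ≤ 255)
    | none => false
  else false

-- an IPV4AddressParser queue item: (level, input, prefix)
abbrev PvItem := Int × List Char × List Char

-- the 'for i in range(1, 4)' body of A's while-loop (children appended to the queue)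
def pvKids (lv : Int) (inp pre : List Char) : List PvItem :=
  (PySem.List.pyRange 1 4 1).foldl (fun que i =>
    if i < (inp.length : Int) then
      let part := PySem.List.slice inp (some 0) (some i)       -- item.input[0:i]
      if is_valid_ipv4_section part then
        que ++ [(lv + 1, PySem.List.slice inp (some i) none,   -- item.input[i:]
                 if pre.isEmpty then part else pre ++ '.' :: part)]
      else que
    else que) []

def pvMeasure (q : List PvItem) : Nat := (q.map (fun it => 4 ^ it.2.1.length)).sum

-- ---- termination facts for pvRun (cited in its decreasing_by), kept small ----

theorem pvMeasure_append (q r : List PvItem) : pvMeasure (q ++ r) = pvMeasure q + pvMeasure r := by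
  simp [pvMeasure]

theorem pvMeasure_cons (it : PvItem) (q : List PvItem) :
    pvMeasure (it :: q) = 4 ^ it.2.1.length + pvMeasure q := by
  simp [pvMeasure]

theorem pvMeasure_cons' (lv : Int) (inp pre : List Char) (q : List PvItem) :
    pvMeasure ((lv, inp, pre) :: q) = 4 ^ inp.length + pvMeasure q := by
  simp [pvMeasure]

theorem pvFoldl_len_le {α β : Type} (f : List α → β → List α)
    (hf : ∀ acc b, (f acc b).length ≤ acc.length + 1) :
    ∀ (l : List β) (acc : List α), (l.foldl f acc).length ≤ acc.length + l.length := by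
  intro l
  induction l with
  | nil => intro acc; simp
  | cons b t ih =>
    intro acc
    calc (t.foldl f (f acc b)).length ≤ (f acc b).length + t.length := ih _
      _ ≤ (acc.length + 1) + t.length := Nat.add_le_add_right (hf acc b) _
      _ = acc.length + (b :: t).length := by simp; omega

theorem pvFoldl_mem_pres {α β : Type} (f : List α → β → List α) (P : α → Prop) (l : List β)
    (hf : ∀ acc b, b ∈ l → ∀ x ∈ f acc b, x ∈ acc ∨ P x) :
    ∀ (acc : List α), (∀ y ∈ acc, P y) → ∀ x ∈ l.foldl f acc, P x := by
  induction l with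
  | nil => intro acc hacc x hx; exact hacc x hx
  | cons b t ih =>
    intro acc hacc x hx
    refine ih (fun acc b hb => hf acc b (List.mem_cons_of_mem _ hb)) (f acc b) ?_ x hx
    intro y hy
    rcases hf acc b List.mem_cons_self y hy with h | h
    · exact hacc y h
    · exact h

theorem pvKids_len (lv : Int) (inp pre : List Char) :
    ∀ it ∈ pvKids lv inp pre, it.2.1.length < inp.length := by
  intro it hit
  refine pvFoldl_mem_pres _ (fun x => x.2.1.length < inp.length) _ ?_ [] (by simp) it hit
  intro acc i hi x hx
  have hi' : 1 ≤ i := (PySem.List.mem_pyRange_one.mp hi).1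
  simp only at hx
  split_ifs at hx
  all_goals first
    | exact Or.inl hx
    | (rcases List.mem_append.mp hx with h | h
       · exact Or.inl h
       · right
         simp only [List.mem_singleton] at h
         subst h
         simp only [PySem.List.slice_from _ (by omega : (0:Int) ≤ i), List.length_drop]
         omega)

theorem pvKids_short (lv : Int) (inp pre : List Char) : (pvKids lv inp pre).length ≤ 3 := by
  unfold pvKids
  refine le_trans (pvFoldl_len_le _ ?_ _ _) (by decide)
  intro acc b
  simp only
  split_ifs <;> simp

theorem pvMeasure_le_of_mem_le (q : List PvItem) (m : Nat)
    (h : ∀ it ∈ q, 4 ^ it.2.1.length ≤ m) : pvMeasure q ≤ q.length * m := by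
  induction q with
  | nil => simp [pvMeasure]
  | cons a t ih =>
    rw [pvMeasure_cons]
    have h1 := h a (List.mem_cons_self)
    have h2 := ih (fun it hit => h it (List.mem_cons_of_mem _ hit))
    calc 4 ^ a.2.1.length + pvMeasure t ≤ m + t.length * m := Nat.add_le_add h1 h2
      _ = (a :: t).length * m := by simp [Nat.succ_mul, Nat.add_comm]

theorem pvKids_measure (lv : Int) (inp pre : List Char) :
    pvMeasure (pvKids lv inp pre) < 4 ^ inp.length := by
  by_cases hk : pvKids lv inp pre = []
  · rw [hk]
    have h0 : 0 < 4 ^ inp.length := Nat.one_le_pow _ _ (by norm_num)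
    simp [pvMeasure, h0]
  · obtain ⟨a, hmem⟩ := List.exists_mem_of_ne_nil _ hk
    have hlen1 : 1 ≤ inp.length := by
      have := pvKids_len lv inp pre a hmem; omega
    have hb : ∀ it ∈ pvKids lv inp pre, 4 ^ it.2.1.length ≤ 4 ^ (inp.length - 1) := by
      intro it hit
      exact Nat.pow_le_pow_right (by norm_num) (by have := pvKids_len lv inp pre it hit; omega)
    have h1 := pvMeasure_le_of_mem_le _ _ hb
    have h2 : (pvKids lv inp pre).length * 4 ^ (inp.length - 1) ≤ 3 * 4 ^ (inp.length - 1) :=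
      Nat.mul_le_mul_right _ (pvKids_short lv inp pre)
    have h12 := le_trans h1 h2
    have h3 : 4 ^ inp.length = 4 * 4 ^ (inp.length - 1) := by
      conv_lhs => rw [show inp.length = (inp.length - 1) + 1 from by omega]
      rw [pow_succ]; ring
    have h4 : 1 ≤ 4 ^ (inp.length - 1) := Nat.one_le_pow _ _ (by norm_num)
    omega

-- A's while-loop over the deque (FIFO: popleft from the front, append at the back)
def pvRun : List PvItem → List String → List String
  | [], generated => generated
  | (lv, inp, pre) :: rest, generated =>
    if lv == 4 && is_valid_ipv4_section inp then
      pvRun rest (generated ++ [String.ofList (pre ++ '.' :: inp)])   -- item.prefix + "." + item.input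
    else
      pvRun (rest ++ pvKids lv inp pre) generated
termination_by q _ => pvMeasure q
decreasing_by
  · have h1 : 1 ≤ 4 ^ inp.length := Nat.one_le_pow _ _ (by norm_num)
    have h2 := pvMeasure_cons' lv inp pre rest
    omega
  · rw [pvMeasure_append]
    have h := pvKids_measure lv inp pre
    have h2 := pvMeasure_cons' lv inp pre rest
    omega

def generate_ip_address_v2 (input : Option String) : List String :=
  match input with
  | none => []
  | some s =>
    let length := s.toList.length
    if length < 4 || length > 12 then []
    else pvRun [(1, s.toList, [])] []

-- ===== PORT B =====

-- ok(seg): seg.isdigit() and 0 <= int(seg) <= 255  (int(seg) cannot raise under isdigit; the none branch is unreachable)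
def pvOk (cs : List Char) : Bool :=
  PySem.Chars.strIsdigit cs &&
    (match PySem.Int.ofChars? cs with
     | some n => decide (0 ≤ n ∧ n ≤ 255)
     | none => false)

-- walk(rest, prefix, depth): DFS over split sizes, the 'for i in (1, 2, 3)' unrolled
def pvWalk (rest pre : List Char) (depth : Nat) : List String :=
  if depth == 3 then
    if pvOk rest then [String.ofList (pre ++ '.' :: rest)] else []
  else
    (if h1 : 1 < rest.length ∧ pvOk (rest.take 1) = true then
        pvWalk (rest.drop 1) (if pre.isEmpty then rest.take 1 else pre ++ '.' :: rest.take 1) (depth + 1)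
      else []) ++
    ((if h2 : 2 < rest.length ∧ pvOk (rest.take 2) = true then
        pvWalk (rest.drop 2) (if pre.isEmpty then rest.take 2 else pre ++ '.' :: rest.take 2) (depth + 1)
      else []) ++
     (if h3 : 3 < rest.length ∧ pvOk (rest.take 3) = true then
        pvWalk (rest.drop 3) (if pre.isEmpty then rest.take 3 else pre ++ '.' :: rest.take 3) (depth + 1)
      else []))
termination_by rest.length
decreasing_by all_goals (simp [List.length_drop]; omega)

def generate_ip_address_v2_alt (input : Option String) : List String :=
  match input with
  | none => []
  | some s =>
    let n := s.toList.length
    if n < 4 || n > 12 then []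
    else pvWalk s.toList [] 0

-- ===== PRECONDITION & SPEC =====
def Spec_generate_ip_address_v2 (input : Option String) (out : List String) : Prop := out = generate_ip_address_v2_alt input
instance (input : Option String) (out : List String) : Decidable (Spec_generate_ip_address_v2 input out) := by unfold Spec_generate_ip_address_v2; infer_instance

-- ===== CLAIM (what is proved, stated in full; the proofs are below) =====
def Claim_equal_generate_ip_address_v2 : Prop := ∀ (input : Option String), Dom_generate_ip_address_v2 input → Spec_generate_ip_address_v2 input (generate_ip_address_v2 input)

-- ===== LEMMAS AND PROOFS =====

-- per-character: A's explicit code-point test is Python's isdigit on ASCII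
theorem pvChdig (c : Char) : (48 ≤ c.toNat && c.toNat ≤ 57) = PySem.Chars.isdigit c := by
  simp only [PySem.Chars.isdigit, Char.le_def, UInt32.le_iff_toNat_le, Char.toNat_val]
  rfl

-- the two validity tests agree on every section
theorem pvValid_eq (cs : List Char) : is_valid_ipv4_section cs = pvOk cs := by
  cases cs with
  | nil => decide
  | cons c t =>
    unfold is_valid_ipv4_section pvOk PySem.Chars.strIsdigit
    rw [show (fun ch => 48 ≤ ch.toNat && ch.toNat ≤ 57) = PySem.Chars.isdigit from funext pvChdig]
    simp only [List.isEmpty_cons, Bool.not_false, Bool.true_and]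
    cases h : (c :: t).all PySem.Chars.isdigit <;> simp

-- normal form of pvKids: at most one child per split size i = 1, 2, 3
theorem pvKids_eq (lv : Int) (inp pre : List Char) :
    pvKids lv inp pre =
      (if 1 < inp.length ∧ is_valid_ipv4_section (inp.take 1) = true then
        [(lv + 1, inp.drop 1, if pre.isEmpty then inp.take 1 else pre ++ '.' :: inp.take 1)] else []) ++
      ((if 2 < inp.length ∧ is_valid_ipv4_section (inp.take 2) = true then
        [(lv + 1, inp.drop 2, if pre.isEmpty then inp.take 2 else pre ++ '.' :: inp.take 2)] else []) ++
       (if 3 < inp.length ∧ is_valid_ipv4_section (inp.take 3) = true then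
        [(lv + 1, inp.drop 3, if pre.isEmpty then inp.take 3 else pre ++ '.' :: inp.take 3)] else [])) := by
  unfold pvKids
  rw [show PySem.List.pyRange 1 4 1 = [1, 2, 3] from by decide]
  simp only [List.foldl]
  simp only [PySem.List.slice_zero_start,
    PySem.List.slice_to _ (by norm_num : (0:Int) ≤ 1),
    PySem.List.slice_to _ (by norm_num : (0:Int) ≤ 2),
    PySem.List.slice_to _ (by norm_num : (0:Int) ≤ 3),
    PySem.List.slice_from _ (by norm_num : (0:Int) ≤ 1),
    PySem.List.slice_from _ (by norm_num : (0:Int) ≤ 2),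
    PySem.List.slice_from _ (by norm_num : (0:Int) ≤ 3)]
  norm_num
  split_ifs <;> simp_all

theorem pvKids_level (lv : Int) (inp pre : List Char) :
    ∀ it ∈ pvKids lv inp pre, it.1 = lv + 1 := by
  rw [pvKids_eq]
  intro it hit
  simp only [List.mem_append] at hit
  rcases hit with h | h | h <;> (split_ifs at h <;> simp_all)


-- total emissions of one queue item's subtree, in DFS order
def pvEm (it : PvItem) : List String :=
  if it.1 == 4 && is_valid_ipv4_section it.2.1 then [String.ofList (it.2.2 ++ '.' :: it.2.1)]
  else ((pvKids it.1 it.2.1 it.2.2).attach.map (fun c => pvEm c.1)).flatten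
termination_by it.2.1.length
decreasing_by exact pvKids_len _ _ _ _ c.2

theorem pvEm_eq (it : PvItem) :
    pvEm it = if it.1 == 4 && is_valid_ipv4_section it.2.1 then [String.ofList (it.2.2 ++ '.' :: it.2.1)]
      else (pvKids it.1 it.2.1 it.2.2).flatMap pvEm := by
  rw [pvEm]
  congr 1
  rw [List.flatMap_def]
  congr 1
  exact List.attach_map_val

theorem pvEm_eq' (lv : Int) (inp pre : List Char) :
    pvEm (lv, inp, pre) = if lv == 4 && is_valid_ipv4_section inp then [String.ofList (pre ++ '.' :: inp)]
      else (pvKids lv inp pre).flatMap pvEm := by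
  exact pvEm_eq (lv, inp, pre)

theorem pvRun_nil (gen : List String) : pvRun [] gen = gen := by
  rw [pvRun.eq_def]

theorem pvRun_cons (lv : Int) (inp pre : List Char) (rest : List PvItem) (gen : List String) :
    pvRun ((lv, inp, pre) :: rest) gen =
      if lv == 4 && is_valid_ipv4_section inp then
        pvRun rest (gen ++ [String.ofList (pre ++ '.' :: inp)])
      else pvRun (rest ++ pvKids lv inp pre) gen := by
  rw [pvRun.eq_def]

-- items beyond level 4 never emit anything
theorem pvEm_gt4 : ∀ (n : Nat) (it : PvItem), it.2.1.length ≤ n → 4 < it.1 → pvEm it = [] := by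
  intro n
  induction n with
  | zero =>
    intro it hlen hlv
    rw [pvEm_eq, if_neg]
    · apply List.flatMap_eq_nil_iff.mpr
      intro x hx
      exfalso
      have := pvKids_len it.1 it.2.1 it.2.2 x hx
      omega
    · simp only [Bool.and_eq_true, beq_iff_eq]
      rintro ⟨h, -⟩; omega
  | succ m ih =>
    intro it hlen hlv
    rw [pvEm_eq, if_neg]
    · apply List.flatMap_eq_nil_iff.mpr
      intro x hx
      have hl := pvKids_len it.1 it.2.1 it.2.2 x hx
      have hv := pvKids_level it.1 it.2.1 it.2.2 x hx
      exact ih x (by omega) (by omega)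
    · simp only [Bool.and_eq_true, beq_iff_eq]
      rintro ⟨h, -⟩; omega

-- BFS over a two-level queue emits exactly the per-item subtree emissions, deeper level first
theorem pvRun_levels : ∀ (n : Nat) (q1 q2 : List PvItem) (L : Int) (gen : List String),
    pvMeasure (q1 ++ q2) ≤ n →
    (∀ it ∈ q1, it.1 = L) → (∀ it ∈ q2, it.1 = L + 1) →
    pvRun (q1 ++ q2) gen = gen ++ q2.flatMap pvEm ++ q1.flatMap pvEm := by
  intro n
  induction n with
  | zero =>
    intro q1 q2 L gen hm h1 h2
    have hnil : q1 ++ q2 = [] := by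
      cases hq : q1 ++ q2 with
      | nil => rfl
      | cons a t =>
        exfalso
        rw [hq, pvMeasure_cons] at hm
        have : 1 ≤ 4 ^ a.2.1.length := Nat.one_le_pow _ _ (by norm_num)
        omega
    obtain ⟨e1, e2⟩ := List.append_eq_nil_iff.mp hnil
    subst e1; subst e2
    rw [List.nil_append, pvRun_nil]
    simp
  | succ m ih =>
    intro q1 q2 L gen hm h1 h2
    cases q1 with
    | nil =>
      cases q2 with
      | nil => rw [List.nil_append, pvRun_nil]; simp
      | cons b q2' =>
        obtain ⟨lv, inp, pre⟩ := b
        have hlv : lv = L + 1 := h2 _ List.mem_cons_self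
        simp only [List.nil_append] at hm ⊢
        have hpow : 1 ≤ 4 ^ inp.length := Nat.one_le_pow _ _ (by norm_num)
        rw [pvRun_cons]
        by_cases hc : (lv == 4 && is_valid_ipv4_section inp) = true
        · rw [if_pos hc]
          have hm' : pvMeasure (q2' ++ []) ≤ m := by
            rw [pvMeasure_cons'] at hm
            simp only [List.append_nil]; omega
          have key := ih q2' [] (L + 1) (gen ++ [String.ofList (pre ++ '.' :: inp)]) hm'
            (fun it hit => h2 it (List.mem_cons_of_mem _ hit)) (by intro it hit; simp at hit)
          simp only [List.append_nil, List.flatMap_nil] at key ⊢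
          rw [key, List.flatMap_cons, pvEm_eq', if_pos hc]
          simp
        · rw [if_neg hc]
          have hkm := pvKids_measure lv inp pre
          have hm' : pvMeasure (q2' ++ pvKids lv inp pre) ≤ m := by
            rw [pvMeasure_append]
            rw [pvMeasure_cons'] at hm
            omega
          have key := ih q2' (pvKids lv inp pre) (L + 1) gen hm'
            (fun it hit => h2 it (List.mem_cons_of_mem _ hit))
            (by intro it hit; rw [pvKids_level lv inp pre it hit, hlv])
          simp only [List.flatMap_nil, List.append_nil] at key ⊢
          rw [key, List.flatMap_cons, pvEm_eq', if_neg hc]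
          simp
    | cons a q1' =>
      obtain ⟨lv, inp, pre⟩ := a
      have hlv : lv = L := h1 _ List.mem_cons_self
      simp only [List.cons_append] at hm ⊢
      have hpow : 1 ≤ 4 ^ inp.length := Nat.one_le_pow _ _ (by norm_num)
      rw [pvRun_cons]
      by_cases hc : (lv == 4 && is_valid_ipv4_section inp) = true
      · -- level-4 item emits; all of q2 is level 5 and emits nothing
        have hL4 : L = 4 := by
          simp only [Bool.and_eq_true, beq_iff_eq] at hc
          omega
        have hq2nil : q2.flatMap pvEm = [] := by
          apply List.flatMap_eq_nil_iff.mpr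
          intro x hx
          exact pvEm_gt4 x.2.1.length x le_rfl (by rw [h2 x hx, hL4]; norm_num)
        rw [if_pos hc]
        have hm' : pvMeasure (q1' ++ q2) ≤ m := by
          rw [pvMeasure_cons', pvMeasure_append] at hm
          rw [pvMeasure_append]
          omega
        have key := ih q1' q2 L (gen ++ [String.ofList (pre ++ '.' :: inp)]) hm'
          (fun it hit => h1 it (List.mem_cons_of_mem _ hit)) h2
        rw [key, List.flatMap_cons, pvEm_eq', if_pos hc]
        simp [hq2nil]
      · rw [if_neg hc]
        have hkm := pvKids_measure lv inp pre
        have hm' : pvMeasure (q1' ++ (q2 ++ pvKids lv inp pre)) ≤ m := by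
          rw [pvMeasure_cons', pvMeasure_append] at hm
          rw [pvMeasure_append, pvMeasure_append]
          omega
        rw [List.append_assoc]
        have key := ih q1' (q2 ++ pvKids lv inp pre) L gen hm'
          (fun it hit => h1 it (List.mem_cons_of_mem _ hit))
          (by intro it hit
              rcases List.mem_append.mp hit with h | h
              · exact h2 it h
              · rw [pvKids_level lv inp pre it h, hlv])
        rw [key, List.flatMap_cons, pvEm_eq', if_neg hc]
        simp [List.flatMap_append]

-- B's DFS computes the subtree emissions of the corresponding queue item
theorem pvWalk_eq_em : ∀ (n : Nat) (rest pre : List Char) (depth : Nat), rest.length ≤ n → depth ≤ 3 →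
    pvWalk rest pre depth = pvEm ((depth : Int) + 1, rest, pre) := by
  intro n
  induction n with
  | zero =>
    intro rest pre depth hlen hdep
    have : rest = [] := List.length_eq_zero_iff.mp (by omega)
    subst this
    rw [pvWalk, pvEm_eq]
    have hval : is_valid_ipv4_section [] = false := by decide
    have hknil : pvKids ((depth : Int) + 1) [] pre = [] := by
      rw [pvKids_eq]; simp
    by_cases hd : depth == 3
    · simp only [hd, if_pos]
      rw [show pvOk [] = false from by decide]
      simp [hval, hknil]
    · simp only [hd, Bool.false_eq_true, if_false]
      simp [hval, hknil]
  | succ m ih =>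
    intro rest pre depth hlen hdep
    by_cases hd : depth = 3
    · subst hd
      rw [pvWalk, pvEm_eq]
      simp only [beq_self_eq_true, if_pos]
      rw [← pvValid_eq]
      by_cases hv : is_valid_ipv4_section rest = true
      · simp only [show ((3:Nat):Int) + 1 = 4 from by norm_num]
        simp [hv]
      · have hv' : is_valid_ipv4_section rest = false := by simp_all
        simp only [show ((3:Nat):Int) + 1 = 4 from by norm_num]
        simp only [hv', Bool.and_false, Bool.false_eq_true, if_false]
        apply (List.flatMap_eq_nil_iff.mpr _).symm
        intro x hx
        have hl := pvKids_len 4 rest pre x hx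
        have hlv := pvKids_level 4 rest pre x hx
        exact pvEm_gt4 x.2.1.length x le_rfl (by omega)
    · -- depth < 3: both sides expand over split sizes 1, 2, 3
      have hd3 : ((depth : Int) + 1 == 4) = false := by
        simp only [beq_eq_false_iff_ne, ne_eq]
        intro h
        have : (depth : Int) = 3 := by omega
        have : depth = 3 := by exact_mod_cast this
        exact hd this
      rw [pvWalk, pvEm_eq]
      simp only [hd3, Bool.false_and, Bool.false_eq_true, if_false,
        show (depth == 3) = false from by simp [hd], pvKids_eq]
      rw [List.flatMap_append, List.flatMap_append]
      have hiff : ∀ k : Nat, (k < rest.length ∧ is_valid_ipv4_section (rest.take k) = true)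
          ↔ (k < rest.length ∧ pvOk (rest.take k) = true) := by
        intro k; rw [pvValid_eq]
      have harm : ∀ k : Nat, 1 ≤ k → k < rest.length ∧ pvOk (rest.take k) = true →
          pvWalk (rest.drop k) (if pre.isEmpty then rest.take k else pre ++ '.' :: rest.take k) (depth + 1)
            = pvEm ((depth : Int) + 1 + 1, rest.drop k,
                if pre.isEmpty then rest.take k else pre ++ '.' :: rest.take k) := by
        intro k h1k hk
        have := ih (rest.drop k) (if pre.isEmpty then rest.take k else pre ++ '.' :: rest.take k)
          (depth + 1) (by simp; omega) (by omega)
        rw [this]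
        congr 1
      congr 1
      · by_cases h : 1 < rest.length ∧ pvOk (rest.take 1) = true
        · rw [dif_pos h, if_pos ((hiff 1).mpr h)]
          simp only [List.flatMap_cons, List.flatMap_nil, List.append_nil]
          exact harm 1 (by norm_num) h
        · rw [dif_neg h, if_neg (fun hh => h ((hiff 1).mp hh))]
          simp
      congr 1
      · by_cases h : 2 < rest.length ∧ pvOk (rest.take 2) = true
        · rw [dif_pos h, if_pos ((hiff 2).mpr h)]
          simp only [List.flatMap_cons, List.flatMap_nil, List.append_nil]
          exact harm 2 (by norm_num) h
        · rw [dif_neg h, if_neg (fun hh => h ((hiff 2).mp hh))]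
          simp
      · by_cases h : 3 < rest.length ∧ pvOk (rest.take 3) = true
        · rw [dif_pos h, if_pos ((hiff 3).mpr h)]
          simp only [List.flatMap_cons, List.flatMap_nil, List.append_nil]
          exact harm 3 (by norm_num) h
        · rw [dif_neg h, if_neg (fun hh => h ((hiff 3).mp hh))]
          simp

-- ===== VERDICT (by name: the statement is the Claim_ definition above) =====
theorem generate_ip_address_v2_spec : Claim_equal_generate_ip_address_v2 := by
  intro input _
  unfold Spec_generate_ip_address_v2 generate_ip_address_v2 generate_ip_address_v2_alt
  cases input with
  | none => rfl
  | some s =>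
    simp only
    by_cases h4 : (decide (s.toList.length < 4) || decide (s.toList.length > 12)) = true
    · rw [if_pos h4, if_pos h4]
    · rw [if_neg h4, if_neg h4]
      have key := pvRun_levels (pvMeasure [(1, s.toList, [])]) [(1, s.toList, [])] [] 1 []
        (by simp) (by intro it hit; simp at hit; subst hit; rfl) (by intro it hit; simp at hit)
      simp only [List.append_nil, List.flatMap_nil, List.nil_append, List.flatMap_cons,
        List.append_nil] at key
      rw [key, pvWalk_eq_em s.toList.length s.toList [] 0 le_rfl (by norm_num)]
      norm_num
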